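-- pv_equiv track=rewrite | github.com/mrdysmas/github-repos-knowledge-factory | tools/ws6_deep_integrator.py | is_api_route_like
-- ===== SOURCE A (Python) =====
-- def is_api_route_like(value: str) -> bool:
--     text = value.strip()
--     if not text:
--         return False
--     if text.startswith(("/", "http://", "https://")):
--         return True
--     upper = text.upper()
--     for method in ("GET", "POST", "PUT", "PATCH", "DELETE", "HEAD", "OPTIONS"):
--         if upper.startswith(f"{method} /") or upper.startswith(f"{method} HTTP"):
--             return True
--     return False
-- ===== SOURCE B (Python) =====
-- _METHODS = frozenset(("GET", "POST", "PUT", "PATCH", "DELETE", "HEAD", "OPTIONS"))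
--
--
-- def is_api_route_like(value: str) -> bool:
--     text = value.strip()
--     if not text:
--         return False
--     if text[0] == "/" or text.startswith("http://") or text.startswith("https://"):
--         return True
--     i = text.find(" ")
--     if i == -1:
--         return False
--     rest = text[i + 1:]
--     return text[:i].upper() in _METHODS and (rest[:1] == "/" or rest[:4].upper() == "HTTP")
-- ===== Notes on version B (the rewrite author's own statement) =====
-- stated objective: alternative
-- what changed: Replaces the loop over 7 HTTP methods with 14 f-string prefix tests on the fully uppercased text by a single find of the first space, one set-membership test of the uppercased head token, and a constant-size check of the tail (rest[:1]=='/' or rest[:4].upper()=='HTTP').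
import Mathlib
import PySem

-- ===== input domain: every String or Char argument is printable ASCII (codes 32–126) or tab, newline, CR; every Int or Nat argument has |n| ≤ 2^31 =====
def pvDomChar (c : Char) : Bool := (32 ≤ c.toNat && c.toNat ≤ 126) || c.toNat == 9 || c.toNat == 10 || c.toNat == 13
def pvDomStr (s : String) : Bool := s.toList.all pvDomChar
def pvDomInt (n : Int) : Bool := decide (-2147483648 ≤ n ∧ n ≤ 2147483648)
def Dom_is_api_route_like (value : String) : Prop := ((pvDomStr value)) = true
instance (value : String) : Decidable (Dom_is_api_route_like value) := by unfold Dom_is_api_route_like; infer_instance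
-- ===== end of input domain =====

-- B replaces A's loop over the 7 HTTP methods (14 f-string prefix tests on the uppercased text)
-- by one find of the first space, a set-membership test of the uppercased head token and a
-- constant-size check of the tail; objective: alternative (same cost, different algorithm).

-- ===== PORT A =====
def is_api_route_like (value : String) : Bool :=
  let text := PySem.Str.strip value
  if PySem.Str.len text = 0 then false
  else if PySem.Str.startswith text "/" || PySem.Str.startswith text "http://" ||
      PySem.Str.startswith text "https://" then true
  else
    let upper := PySem.Str.upper text
    -- the f-string "{method} /" / "{method} HTTP" is ported as list append on the char lists (exact)
    ["GET", "POST", "PUT", "PATCH", "DELETE", "HEAD", "OPTIONS"].any fun m =>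
      PySem.Chars.startswith upper.toList (m.toList ++ " /".toList) ||
      PySem.Chars.startswith upper.toList (m.toList ++ " HTTP".toList)

-- ===== PORT B =====
-- port of the module constant _METHODS (a frozenset used only for membership)
def altMethods : List (List Char) :=
  ["GET".toList, "POST".toList, "PUT".toList, "PATCH".toList, "DELETE".toList,
   "HEAD".toList, "OPTIONS".toList]

def is_api_route_like_alt (value : String) : Bool :=
  let text := PySem.Str.strip value
  if PySem.Str.len text = 0 then false
  else if PySem.Str.pyGet? text 0 == some '/' || PySem.Str.startswith text "http://" ||
      PySem.Str.startswith text "https://" then true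
  else
    let i := PySem.Str.find text " "
    if i = -1 then false
    else
      let rest := PySem.List.slice text.toList (some (i + 1)) none
      altMethods.contains (PySem.Chars.upper (PySem.List.slice text.toList none (some i))) &&
        (PySem.List.slice rest none (some 1) == "/".toList ||
         PySem.Chars.upper (PySem.List.slice rest none (some 4)) == "HTTP".toList)

-- ===== PRECONDITION & SPEC =====
def Spec_is_api_route_like (value : String) (out : Bool) : Prop := out = is_api_route_like_alt value
instance (value : String) (out : Bool) : Decidable (Spec_is_api_route_like value out) := by unfold Spec_is_api_route_like; infer_instance

-- ===== CLAIM (what is proved, stated in full; the proofs are below) =====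
def Claim_equal_is_api_route_like : Prop := ∀ (value : String), Dom_is_api_route_like value → Spec_is_api_route_like value (is_api_route_like value)

-- ===== LEMMAS AND PROOFS =====

-- upperChar fixes any character that is neither an uppercase nor a lowercase ASCII letter
lemma upperChar_eq_nonletter (c d : Char) (hd1 : ¬(65 ≤ d.toNat ∧ d.toNat ≤ 90))
    (hd2 : ¬(97 ≤ d.toNat ∧ d.toNat ≤ 122)) :
    PySem.Chars.upperChar c = d ↔ c = d := by
  unfold PySem.Chars.upperChar PySem.Chars.islower
  split
  · rename_i h
    simp only [Bool.and_eq_true, decide_eq_true_eq, Char.le_def, UInt32.le_iff_toNat_le] at h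
    have h1 : 97 ≤ c.toNat := h.1
    have h2 : c.toNat ≤ 122 := h.2
    constructor
    · intro he
      exfalso
      have ht := congrArg Char.toNat he
      rw [Char.toNat_ofNat, if_pos (Or.inl (by omega))] at ht
      exact hd1 ⟨by omega, by omega⟩
    · intro he
      subst he
      exact absurd ⟨h1, h2⟩ hd2
  · simp

lemma upperChar_space (c : Char) : PySem.Chars.upperChar c = ' ' ↔ c = ' ' :=
  upperChar_eq_nonletter c ' ' (by decide) (by decide)

lemma upperChar_slash (c : Char) : PySem.Chars.upperChar c = '/' ↔ c = '/' :=
  upperChar_eq_nonletter c '/' (by decide) (by decide)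

lemma singleton_infix {a : Char} {l : List Char} : [a] <:+: l ↔ a ∈ l := by
  constructor
  · intro h; exact h.mem (by simp)
  · intro h
    obtain ⟨s, t, rfl⟩ := List.append_of_mem h
    exact ⟨s, t, by simp⟩

lemma mem_space_upper {L : List Char} : ' ' ∈ PySem.Chars.upper L ↔ ' ' ∈ L := by
  simp only [PySem.Chars.upper, List.mem_map]
  constructor
  · rintro ⟨c, hc, he⟩; rwa [(upperChar_space c).mp he] at hc
  · intro h; exact ⟨' ', h, by decide⟩

lemma upper_nospace {h : List Char} (hh : ∀ c ∈ h, c ≠ ' ') :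
    ∀ c ∈ PySem.Chars.upper h, c ≠ ' ' := by
  intro c hc he
  subst he
  exact hh _ (mem_space_upper.mp hc) rfl

-- a prefix of the form M ++ ' ' :: R matches h ++ ' ' :: t exactly when M = h and R <+: t,
-- provided neither M nor h contains a space
lemma split_prefix (M : List Char) (h R t : List Char) (hM : ∀ c ∈ M, c ≠ ' ')
    (hh : ∀ c ∈ h, c ≠ ' ') :
    (M ++ ' ' :: R) <+: (h ++ ' ' :: t) ↔ M = h ∧ R <+: t := by
  induction M generalizing h with
  | nil =>
    cases h with
    | nil => simp
    | cons c h' =>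
      simp only [List.nil_append, List.cons_append, List.cons_prefix_cons]
      constructor
      · rintro ⟨he, -⟩; exact absurd he.symm (hh c (by simp))
      · rintro ⟨he, -⟩; exact absurd he (by simp)
  | cons a M' ih =>
    cases h with
    | nil =>
      simp only [List.cons_append, List.nil_append, List.cons_prefix_cons]
      constructor
      · rintro ⟨he, -⟩; exact absurd he (hM a (by simp))
      · rintro ⟨he, -⟩; exact absurd he (by simp)
    | cons c h' =>
      simp only [List.cons_append, List.cons_prefix_cons]
      rw [ih h' (fun x hx => hM x (by simp [hx])) (fun x hx => hh x (by simp [hx]))]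
      constructor
      · rintro ⟨rfl, rfl, hr⟩; exact ⟨rfl, hr⟩
      · rintro ⟨he, hr⟩
        injection he with h1 h2
        exact ⟨h1, h2, hr⟩

lemma meth_one (m h t R : List Char) (hM : ∀ c ∈ m, c ≠ ' ') (hh : ∀ c ∈ h, c ≠ ' ') :
    PySem.Chars.startswith (PySem.Chars.upper (h ++ ' ' :: t)) (m ++ ' ' :: R) =
      ((PySem.Chars.upper h == m) && PySem.Chars.startswith (PySem.Chars.upper t) R) := by
  have hu : PySem.Chars.upper (h ++ ' ' :: t) =
      PySem.Chars.upper h ++ ' ' :: PySem.Chars.upper t := by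
    simp only [PySem.Chars.upper, List.map_append, List.map_cons]
    rw [show PySem.Chars.upperChar ' ' = ' ' from by decide]
  rw [Bool.eq_iff_iff]
  simp only [PySem.Chars.startswith, Bool.and_eq_true, beq_iff_eq,
    List.isPrefixOf_iff_prefix, hu]
  rw [split_prefix m (PySem.Chars.upper h) R (PySem.Chars.upper t) hM (upper_nospace hh)]
  constructor
  · rintro ⟨he, hr⟩; exact ⟨he.symm, hr⟩
  · rintro ⟨he, hr⟩; exact ⟨he.symm, hr⟩

lemma tail_slash (t : List Char) :
    PySem.Chars.startswith (PySem.Chars.upper t) "/".toList = (t.take 1 == "/".toList) := by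
  cases t with
  | nil => decide
  | cons c t' =>
    rw [Bool.eq_iff_iff]
    simp only [PySem.Chars.upper, List.map_cons, PySem.Chars.startswith,
      List.isPrefixOf_iff_prefix, List.take_succ_cons, List.take_zero, beq_iff_eq]
    show ['/'] <+: _ ↔ _
    rw [List.cons_prefix_cons]
    constructor
    · rintro ⟨he, -⟩
      rw [(upperChar_slash c).mp he.symm]
      decide
    · intro he
      have hc : c = '/' := by simpa using congrArg (fun l => l.headI) he
      subst hc
      exact ⟨by decide, by simp⟩

lemma tail_http (t : List Char) :
    PySem.Chars.startswith (PySem.Chars.upper t) "HTTP".toList =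
      (PySem.Chars.upper (t.take 4) == "HTTP".toList) := by
  rw [Bool.eq_iff_iff]
  simp only [PySem.Chars.startswith, List.isPrefixOf_iff_prefix, beq_iff_eq,
    List.prefix_iff_eq_take, PySem.Chars.upper, ← List.map_take]
  have : ("HTTP".toList).length = 4 := by decide
  rw [this]
  exact eq_comm

-- the heart of the proof: A's 14 prefix tests against the uppercased text equal
-- B's find-the-space / head-token-membership / tail check, for every char list L
set_option maxRecDepth 8192 in
lemma meth_eq (L : List Char) :
    (["GET", "POST", "PUT", "PATCH", "DELETE", "HEAD", "OPTIONS"].any fun m =>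
        PySem.Chars.startswith (PySem.Chars.upper L) (m.toList ++ " /".toList) ||
        PySem.Chars.startswith (PySem.Chars.upper L) (m.toList ++ " HTTP".toList)) =
      (if PySem.Chars.find L " ".toList = -1 then false
       else
        altMethods.contains (PySem.Chars.upper
            (PySem.List.slice L none (some (PySem.Chars.find L " ".toList)))) &&
          (PySem.List.slice (PySem.List.slice L (some (PySem.Chars.find L " ".toList + 1)) none)
              none (some 1) == "/".toList ||
           PySem.Chars.upper (PySem.List.slice
              (PySem.List.slice L (some (PySem.Chars.find L " ".toList + 1)) none)
              none (some 4)) == "HTTP".toList)) := by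
  simp only [show (" /".toList : List Char) = ' ' :: "/".toList from by decide,
    show (" HTTP".toList : List Char) = ' ' :: "HTTP".toList from by decide]
  by_cases hmem : ' ' ∈ L
  case neg =>
    have hf : PySem.Chars.find L " ".toList = -1 := by
      rw [PySem.Chars.find_eq_neg_one_iff]
      intro hinf
      exact hmem (singleton_infix.mp (by simpa using hinf))
    rw [if_pos hf]
    refine List.any_eq_false.mpr ?_
    intro m hm
    have hpre : ∀ R : List Char,
        PySem.Chars.startswith (PySem.Chars.upper L) (m.toList ++ ' ' :: R) = false := by
      intro R
      rw [Bool.eq_false_iff]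
      intro hc
      rw [PySem.Chars.startswith, List.isPrefixOf_iff_prefix] at hc
      have hsp : ' ' ∈ PySem.Chars.upper L := hc.subset (by simp)
      exact hmem (mem_space_upper.mp hsp)
    simp [hpre]
  case pos =>
    have hinf : (" ".toList : List Char) <:+: L := by
      simpa using singleton_infix.mpr hmem
    have hnn : 0 ≤ PySem.Chars.find L " ".toList := (PySem.Chars.find_nonneg_iff _ _).mpr hinf
    have hne : ¬ PySem.Chars.find L " ".toList = -1 := by omega
    rw [if_neg hne]
    obtain ⟨hpre, hmin⟩ := PySem.Chars.find_spec (s := L) (sub := " ".toList) hnn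
    set n : Nat := (PySem.Chars.find L " ".toList).toNat with hn
    have hin : PySem.Chars.find L " ".toList = (n : Int) := by omega
    have hdrop : L.drop n = ' ' :: L.drop (n + 1) := by
      obtain ⟨s, hs⟩ := hpre
      have hs' : L.drop n = ' ' :: s := by
        rw [← hs, show (" ".toList : List Char) = [' '] from by decide]
        rfl
      rw [hs']
      congr 1
      have h1 : L.drop (n + 1) = (L.drop n).drop 1 := by
        rw [List.drop_drop]
      rw [h1, hs', List.drop_one, List.tail_cons]
    have hL : L = L.take n ++ ' ' :: L.drop (n + 1) := by
      conv_lhs => rw [← List.take_append_drop n L]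
      rw [hdrop]
    have hnosp : ∀ c ∈ L.take n, c ≠ ' ' := by
      intro c hc he
      subst he
      obtain ⟨j, hj, hg⟩ := List.mem_iff_getElem.mp hc
      have hjn : j < n := by
        simp only [List.length_take] at hj; omega
      have hjL : j < L.length := by
        simp only [List.length_take] at hj; omega
      apply hmin j hjn
      refine ⟨L.drop (j + 1), ?_⟩
      rw [show (" ".toList : List Char) = [' '] from by decide]
      rw [List.drop_eq_getElem_cons hjL]
      have : L[j] = ' ' := by rw [← hg]; exact (List.getElem_take).symm
      rw [this]
      simp
    have h0 : PySem.List.slice L none (some (PySem.Chars.find L " ".toList)) = L.take n := by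
      rw [hin, PySem.List.slice_to L (by omega)]
      simp
    have h1 : PySem.List.slice L (some (PySem.Chars.find L " ".toList + 1)) none
        = L.drop (n + 1) := by
      rw [hin, PySem.List.slice_from L (by omega)]
      rw [show (((n : Int) + 1).toNat) = n + 1 from by omega]
    rw [h0, h1, PySem.List.slice_to _ (by omega : (0:Int) ≤ 1),
      PySem.List.slice_to _ (by omega : (0:Int) ≤ 4)]
    rw [show ((1:Int).toNat) = 1 from rfl, show ((4:Int).toNat) = 4 from rfl]
    generalize hh' : L.take n = h at *
    generalize ht' : L.drop (n + 1) = t at *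
    rw [hL]
    simp only [List.any_cons, List.any_nil, Bool.or_false]
    rw [meth_one "GET".toList h t "/".toList (by simp) hnosp,
      meth_one "GET".toList h t "HTTP".toList (by simp) hnosp,
      meth_one "POST".toList h t "/".toList (by simp) hnosp,
      meth_one "POST".toList h t "HTTP".toList (by simp) hnosp,
      meth_one "PUT".toList h t "/".toList (by simp) hnosp,
      meth_one "PUT".toList h t "HTTP".toList (by simp) hnosp,
      meth_one "PATCH".toList h t "/".toList (by simp) hnosp,
      meth_one "PATCH".toList h t "HTTP".toList (by simp) hnosp,
      meth_one "DELETE".toList h t "/".toList (by simp) hnosp,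
      meth_one "DELETE".toList h t "HTTP".toList (by simp) hnosp,
      meth_one "HEAD".toList h t "/".toList (by simp) hnosp,
      meth_one "HEAD".toList h t "HTTP".toList (by simp) hnosp,
      meth_one "OPTIONS".toList h t "/".toList (by simp) hnosp,
      meth_one "OPTIONS".toList h t "HTTP".toList (by simp) hnosp]
    rw [tail_slash, tail_http]
    simp only [← Bool.and_or_distrib_left]
    cases hC : (t.take 1 == "/".toList || PySem.Chars.upper (t.take 4) == "HTTP".toList)
    · simp
    · simp only [Bool.and_true]
      rw [List.contains_eq_any_beq]
      simp [altMethods]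

-- A's tuple-startswith "/" equals B's text[0] == "/" on the char list
lemma head_slash (l : List Char) :
    PySem.Chars.startswith l "/".toList = (PySem.List.pyGet? l 0 == some '/') := by
  cases l with
  | nil => decide
  | cons c l' =>
    rw [Bool.eq_iff_iff]
    simp only [PySem.Chars.startswith, List.isPrefixOf_iff_prefix, beq_iff_eq]
    rw [show ("/".toList : List Char) = ['/'] from by decide, List.cons_prefix_cons]
    simp [PySem.List.pyGet?, PySem.List.pyIdx?, eq_comm]

-- ===== VERDICT (by name: the statement is the Claim_ definition above) =====
theorem is_api_route_like_spec : Claim_equal_is_api_route_like := by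
  intro value _
  unfold Spec_is_api_route_like is_api_route_like is_api_route_like_alt
  simp only [PySem.Str.startswith_eq, PySem.Str.pyGet?_eq, PySem.Str.find_eq,
    PySem.Str.toList_upper, PySem.Chars.pyGet?_eq_listPyGet?]
  rw [head_slash, meth_eq]
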